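-- pv_equiv track=rewrite | github.com/taddeus/advent-of-code | 2020/20_jigsaw.py | findpat
-- ===== SOURCE A (Python) =====
-- def vflip(tile, sz):
--     return ''.join(tile[i:i + sz] for i in range((sz - 1) * sz, -1, -sz))
--
-- def lrotate(tile, sz):
--     return ''.join(tile[sz - 1 - i::sz] for i in range(sz))
--
-- def fliprot(tile, sz):
--     for variant in (tile, vflip(tile, sz)):
--         yield variant
--         for i in range(3):
--             variant = lrotate(variant, sz)
--             yield variant
--
-- def findpat(tile, pattern, sz):
--     diffs = [y * sz + x
--              for y, line in enumerate(pattern)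
--              for x, char in enumerate(line)
--              if char == '#']
--     found = set()
--     for variant in fliprot(tile, sz):
--         for y in range(sz - len(pattern) + 1):
--             for x in range(sz - len(pattern[0]) + 1):
--                 base = y * sz + x
--                 if all(variant[base + i] == '#' for i in diffs):
--                     found |= {base + i for i in diffs}
--         if found:
--             return variant, found
-- ===== SOURCE B (Python) =====
-- def vflip(tile, sz):
--     return ''.join(tile[i:i + sz] for i in range((sz - 1) * sz, -1, -sz))
--
-- def lrotate(tile, sz):
--     return ''.join(tile[sz - 1 - i::sz] for i in range(sz))
--
-- def fliprot(tile, sz):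
--     for variant in (tile, vflip(tile, sz)):
--         yield variant
--         for i in range(3):
--             variant = lrotate(variant, sz)
--             yield variant
--
-- def findpat(tile, pattern, sz):
--     diffs = [y * sz + x
--              for y, line in enumerate(pattern)
--              for x, char in enumerate(line)
--              if char == '#']
--     if not diffs:
--         return None
--     height = sz - len(pattern) + 1
--     width = sz - len(pattern[0]) + 1
--     if height <= 0 or width <= 0:
--         return None
--     d0 = diffs[0]
--     for variant in fliprot(tile, sz):
--         hashes = [p for p, c in enumerate(variant) if c == '#']
--         hashset = set(hashes)
--         found = set()
--         for p in hashes: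
--             base = p - d0
--             if base < 0:
--                 continue
--             y, x = divmod(base, sz)
--             if y < height and x < width and all(base + d in hashset for d in diffs):
--                 found.update(base + d for d in diffs)
--         if found:
--             return variant, found
--     return None
-- ===== Notes on version B (the rewrite author's own statement) =====
-- stated objective: alternative
-- what changed: Instead of testing the pattern at every (y,x) cell of each orientation's scan window, B precomputes each orientation's list/set of '#' positions once and scans only those positions as anchors for the pattern's first required cell, recovering the window cell by divmod and checking the remaining offsets by set membership instead of string indexing.
-- outside the precondition, e.g. on findpat('....#', ['', '#'], 2): A returns ('....#', {4}), B returns None; on findpat('#.', ['#'], 1): A returns ('#.', {0}), B returns ('#.', {0})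
import Mathlib
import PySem

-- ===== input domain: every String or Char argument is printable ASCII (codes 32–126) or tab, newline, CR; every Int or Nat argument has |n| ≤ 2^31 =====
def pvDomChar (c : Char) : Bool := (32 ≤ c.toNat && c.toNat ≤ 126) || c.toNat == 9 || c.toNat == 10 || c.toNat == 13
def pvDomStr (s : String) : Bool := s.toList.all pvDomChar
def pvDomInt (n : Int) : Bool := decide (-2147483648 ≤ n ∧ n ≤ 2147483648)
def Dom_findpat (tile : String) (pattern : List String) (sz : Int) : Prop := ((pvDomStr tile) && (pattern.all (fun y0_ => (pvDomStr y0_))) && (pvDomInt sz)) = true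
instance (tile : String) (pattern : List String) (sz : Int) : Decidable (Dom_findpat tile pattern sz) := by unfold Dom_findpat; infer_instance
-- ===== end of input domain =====

-- B replaces A's full (y, x) window scan per orientation by an anchor scan over the precomputed
-- list of '#' positions (set membership instead of string indexing); objective: alternative.

-- ===== PORT A =====
-- shared module helpers (vflip / lrotate / fliprot are the same module functions in both Pythons)
def vflipC (t : List Char) (sz : Int) : List Char :=
  ((PySem.List.pyRange ((sz - 1) * sz) (-1) (-sz)).map
    (fun i => PySem.List.slice t (some i) (some (i + sz)))).flatten

def lrotC (t : List Char) (sz : Int) : List Char :=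
  ((PySem.List.pyRange 0 sz 1).map
    (fun i => (PySem.List.slice? t (some (sz - 1 - i)) none sz).getD [])).flatten

-- fliprot: tile, its three successive rotations, vflip(tile), its three successive rotations
def variantsC (t : List Char) (sz : Int) : List (List Char) :=
  let a1 := lrotC t sz
  let a2 := lrotC a1 sz
  let a3 := lrotC a2 sz
  let v := vflipC t sz
  let b1 := lrotC v sz
  let b2 := lrotC b1 sz
  let b3 := lrotC b2 sz
  [t, a1, a2, a3, v, b1, b2, b3]

-- diffs = [y*sz + x for y, line in enumerate(pattern) for x, char in enumerate(line) if char == '#']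
-- (the identical comprehension appears verbatim in both Pythons)
def patDiffs (pattern : List String) (sz : Int) : List Int :=
  (PySem.List.enumerate pattern 0).flatMap (fun yl =>
    ((PySem.List.enumerate yl.2.toList 0).filter (fun xc => xc.2 == '#')).map
      (fun xc => yl.1 * sz + xc.1))

def matchA (v : List Char) (diffs : List Int) (base : Int) : Bool :=
  diffs.all (fun i => PySem.List.pyGet? v (base + i) == some '#')

def scanA (diffs : List Int) (sz H W : Int) (v : List Char) (found : PySem.Set Int) : PySem.Set Int :=
  (PySem.List.pyRange 0 H 1).foldl (fun acc y =>
    (PySem.List.pyRange 0 W 1).foldl (fun acc2 x =>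
      if matchA v diffs (y * sz + x) then
        PySem.Set.update acc2 (diffs.map (fun i => y * sz + x + i))
      else acc2) acc) found

def loopA (diffs : List Int) (sz H W : Int) :
    List (List Char) → PySem.Set Int → Option (List Char × List Int)
  | [], _ => none
  | v :: rest, found =>
    let found' := scanA diffs sz H W v found
    if found'.isEmpty then loopA diffs sz H W rest found' else some (v, found')

def findpat (tile : String) (pattern : List String) (sz : Int) : Option (String × List Int) :=
  let diffs := patDiffs pattern sz
  let H := sz - (pattern.length : Int) + 1
  let W := sz - ((PySem.List.pyGetD pattern 0 "").toList.length : Int) + 1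
  (loopA diffs sz H W (variantsC tile.toList sz) PySem.Set.empty).map
    (fun r => (String.ofList r.1, r.2))

-- ===== PORT B =====
def hashesOf (v : List Char) : List Int :=
  ((PySem.List.enumerate v 0).filter (fun pc => pc.2 == '#')).map (fun pc => pc.1)

def scanB (diffs : List Int) (d0 sz H W : Int) (v : List Char) : PySem.Set Int :=
  let hashes := hashesOf v
  let hs : PySem.Set Int := PySem.Set.ofList hashes
  hashes.foldl (fun acc p =>
    if p - d0 < 0 then acc
    else if (decide (PySem.Int.floordiv (p - d0) sz < H) &&
             decide (PySem.Int.mod (p - d0) sz < W) &&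
             diffs.all (fun d => PySem.Set.contains hs (p - d0 + d))) then
      PySem.Set.update acc (diffs.map (fun d => p - d0 + d))
    else acc) PySem.Set.empty

def loopB (diffs : List Int) (d0 sz H W : Int) :
    List (List Char) → Option (List Char × List Int)
  | [] => none
  | v :: rest =>
    let found := scanB diffs d0 sz H W v
    if found.isEmpty then loopB diffs d0 sz H W rest else some (v, found)

def findpat_alt (tile : String) (pattern : List String) (sz : Int) : Option (String × List Int) :=
  let diffs := patDiffs pattern sz
  match diffs with
  | [] => none
  | d0 :: _ =>
    let H := sz - (pattern.length : Int) + 1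
    let W := sz - ((PySem.List.pyGetD pattern 0 "").toList.length : Int) + 1
    if H ≤ 0 ∨ W ≤ 0 then none
    else
      (loopB diffs d0 sz H W (variantsC tile.toList sz)).map
        (fun r => (String.ofList r.1, r.2))

-- ===== PRECONDITION & SPEC =====
-- Pre_ excludes sz = 0 (A's vflip raises ValueError) and shape-inconsistent inputs — tile length
-- ≠ sz*sz, a pattern row longer than row 0, or an empty pattern reached by the scan — on which
-- A's flat-index scan typically raises IndexError and otherwise returns a value accidental to how
-- far the scan got before stopping.
def Pre_findpat (tile : String) (pattern : List String) (sz : Int) : Prop :=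
  sz ≠ 0 ∧
  ( sz + 1 ≤ (pattern.length : Int)
  ∨ (pattern ≠ [] ∧ sz + 1 ≤ ((PySem.List.pyGetD pattern 0 "").toList.length : Int))
  ∨ (pattern ≠ [] ∧ ∀ l ∈ pattern, '#' ∉ l.toList)
  ∨ (1 ≤ sz ∧ (tile.toList.length : Int) = sz * sz ∧ pattern ≠ [] ∧
      ∀ l ∈ pattern, l.toList.length ≤ (PySem.List.pyGetD pattern 0 "").toList.length) )
instance (tile : String) (pattern : List String) (sz : Int) : Decidable (Pre_findpat tile pattern sz) := by
  unfold Pre_findpat; infer_instance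

def pvWitness_findpat : String × List String × Int := ("#...", ["#"], 2)

def Spec_findpat (tile : String) (pattern : List String) (sz : Int) (out : Option (String × List Int)) : Prop := out = findpat_alt tile pattern sz
instance (tile : String) (pattern : List String) (sz : Int) (out : Option (String × List Int)) : Decidable (Spec_findpat tile pattern sz out) := by unfold Spec_findpat; infer_instance

-- ===== CLAIM (what is proved, stated in full; the proofs are below) =====
def Claim_equal_findpat : Prop := ∀ (tile : String) (pattern : List String) (sz : Int), Dom_findpat tile pattern sz → Pre_findpat tile pattern sz → Spec_findpat tile pattern sz (findpat tile pattern sz)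

-- ===== LEMMAS AND PROOFS =====

-- a per-variant scan that never finds anything leaves A's loop returning none
theorem loopA_none (diffs : List Int) (sz H W : Int)
    (h : ∀ v found, scanA diffs sz H W v found = found) :
    ∀ vs, loopA diffs sz H W vs [] = none := by
  intro vs
  induction vs with
  | nil => rfl
  | cons v rest ih => simp [loopA, h, ih]

theorem scanA_empty_diffs (sz H W : Int) (v : List Char) (found : PySem.Set Int) :
    scanA [] sz H W v found = found := by
  simp [scanA, matchA, PySem.Set.update]

theorem scanA_no_window (diffs : List Int) (sz H W : Int) (hHW : H ≤ 0 ∨ W ≤ 0)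
    (v : List Char) (found : PySem.Set Int) :
    scanA diffs sz H W v found = found := by
  rcases hHW with hH | hW
  · simp [scanA, PySem.List.pyRange_one_eq_nil (by omega : H ≤ 0)]
  · simp [scanA, PySem.List.pyRange_one_eq_nil (by omega : W ≤ 0)]

-- if the per-variant scans agree, the two variant loops agree
theorem loop_eq (diffs : List Int) (d0 sz H W : Int)
    (h : ∀ v, scanA diffs sz H W v [] = scanB diffs d0 sz H W v) :
    ∀ vs, loopA diffs sz H W vs [] = loopB diffs d0 sz H W vs := by
  intro vs
  induction vs with
  | nil => rfl
  | cons v rest ih =>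
    simp only [loopA, loopB, ← h v]
    by_cases he : (scanA diffs sz H W v []).isEmpty
    · have h0 : scanA diffs sz H W v [] = [] := by simpa [List.isEmpty_iff] using he
      simp [h0, ih]
    · simp [he]

-- membership in the '#'-position list
theorem mem_hashesOf (v : List Char) (p : Int) :
    p ∈ hashesOf v ↔ ∃ (k : Nat) (_ : k < v.length), v[k] = '#' ∧ p = (k : Int) := by
  simp only [hashesOf, List.mem_map, List.mem_filter, PySem.List.mem_enumerate_iff]
  constructor
  · rintro ⟨⟨q, c⟩, ⟨⟨k, hk, hqc⟩, hc⟩, hp⟩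
    cases hqc
    exact ⟨k, hk, by simpa using hc, by simpa using hp.symm⟩
  · rintro ⟨k, hk, hc, hp⟩
    exact ⟨((k : Int), v[k]), ⟨⟨k, hk, by simp⟩, by simpa using hc⟩, by simpa using hp.symm⟩

theorem pairwise_hashesOf (v : List Char) : (hashesOf v).Pairwise (· < ·) := by
  have h1 := PySem.List.pairwise_lt_enumerate (xs := v) (s := 0)
  exact List.pairwise_map.mpr (h1.filter _)

-- indexing equals '#'-membership, for nonnegative indices
theorem pyGet_hash (v : List Char) (i : Int) (hi : 0 ≤ i) :
    (PySem.List.pyGet? v i == some '#') = true ↔ i ∈ hashesOf v := by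
  have hg : PySem.List.pyGet? v i = v[i.toNat]? := PySem.List.pyGet?_of_nonneg v hi
  rw [hg, mem_hashesOf]
  constructor
  · intro h
    have h' : v[i.toNat]? = some '#' := by simpa using h
    rw [List.getElem?_eq_some_iff] at h'
    exact ⟨i.toNat, h'.1, h'.2, by omega⟩
  · rintro ⟨k, hk, hc, rfl⟩
    simp [hk, hc]

-- every diff offset is nonnegative
theorem patDiffs_nonneg (pattern : List String) (sz : Int) (hsz : 0 ≤ sz) :
    ∀ d ∈ patDiffs pattern sz, 0 ≤ d := by
  intro d hd
  simp only [patDiffs, List.mem_flatMap, List.mem_map, List.mem_filter,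
    PySem.List.mem_enumerate_iff] at hd
  obtain ⟨⟨y, l⟩, ⟨k, hk, hyl⟩, ⟨x, c⟩, ⟨⟨j, hj, hxc⟩, _⟩, hd⟩ := hd
  cases hyl; cases hxc
  simp only [] at hd
  subst hd
  positivity

-- a nonempty diffs list means some pattern row contains '#'
theorem patDiffs_ne_nil (pattern : List String) (sz : Int) (h : patDiffs pattern sz ≠ []) :
    ∃ l ∈ pattern, '#' ∈ l.toList := by
  rcases List.exists_mem_of_ne_nil _ h with ⟨d, hd⟩
  simp only [patDiffs, List.mem_flatMap, List.mem_map, List.mem_filter,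
    PySem.List.mem_enumerate_iff] at hd
  obtain ⟨⟨y, l⟩, ⟨k, hk, hyl⟩, ⟨x, c⟩, ⟨⟨j, hj, hxc⟩, hc⟩, _⟩ := hd
  cases hyl; cases hxc
  refine ⟨pattern[k], List.getElem_mem hk, ?_⟩
  have hj' : pattern[k].toList[j] = '#' := by simpa using hc
  exact hj' ▸ List.getElem_mem hj

-- the window bases, as a flat list
def windowBases (sz H W : Int) : List Int :=
  (PySem.List.pyRange 0 H 1).flatMap (fun y => (PySem.List.pyRange 0 W 1).map (fun x => y * sz + x))

theorem mem_windowBases (sz H W b : Int) (hsz : 1 ≤ sz) (hW : W ≤ sz) :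
    b ∈ windowBases sz H W ↔
      0 ≤ b ∧ PySem.Int.floordiv b sz < H ∧ PySem.Int.mod b sz < W := by
  simp only [windowBases, List.mem_flatMap, List.mem_map, PySem.List.mem_pyRange_one]
  constructor
  · rintro ⟨y, ⟨hy0, hyH⟩, x, ⟨hx0, hxW⟩, rfl⟩
    have hfd : PySem.Int.floordiv (y * sz + x) sz = y := by
      rw [PySem.Int.floordiv_eq_iff_of_pos (by omega)]
      constructor <;> nlinarith
    have hmd : PySem.Int.mod (y * sz + x) sz = x := by
      have := PySem.Int.floordiv_mul_add_mod (y * sz + x) sz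
      rw [hfd] at this; omega
    refine ⟨by positivity, by rw [hfd]; exact hyH, by rw [hmd]; exact hxW⟩
  · rintro ⟨hb, hfd, hmd⟩
    refine ⟨PySem.Int.floordiv b sz, ⟨?_, hfd⟩, PySem.Int.mod b sz,
      ⟨PySem.Int.mod_nonneg _ (by omega), hmd⟩, ?_⟩
    · rw [PySem.Int.floordiv_eq_ediv_of_pos (by omega)]
      exact Int.ediv_nonneg hb (by omega)
    · have := PySem.Int.floordiv_mul_add_mod b sz
      omega

theorem pairwise_windowBases (sz H W : Int) (hW : W ≤ sz) :
    (windowBases sz H W).Pairwise (· < ·) := by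
  rw [windowBases, List.pairwise_flatMap]
  refine ⟨?_, ?_⟩
  · intro y _
    exact List.pairwise_map.mpr ((PySem.List.pairwise_lt_pyRange_one 0 W).imp (by omega))
  · have hp := PySem.List.pairwise_lt_pyRange_one 0 H
    refine hp.imp_of_mem ?_
    intro y y' hy hy' hlt b hb b' hb'
    simp only [List.mem_map, PySem.List.mem_pyRange_one] at hb hb'
    obtain ⟨x, ⟨hx0, hxW⟩, rfl⟩ := hb
    obtain ⟨x', ⟨hx0', _⟩, rfl⟩ := hb'
    rcases PySem.List.mem_pyRange_one.mp hy with ⟨h0, _⟩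
    have hszpos : (0:Int) < sz := by nlinarith
    have h1 : y * sz + x < (y + 1) * sz := by nlinarith
    have h2 : (y + 1) * sz ≤ y' * sz := by nlinarith
    omega

-- B's anchor acceptance test, named for the filter
def okB (diffs : List Int) (d0 sz H W : Int) (v : List Char) (p : Int) : Bool :=
  !decide (p - d0 < 0) &&
  (decide (PySem.Int.floordiv (p - d0) sz < H) &&
   decide (PySem.Int.mod (p - d0) sz < W) &&
   diffs.all (fun d => PySem.Set.contains (PySem.Set.ofList (hashesOf v)) (p - d0 + d)))

theorem contains_hashes (v : List Char) (z : Int) :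
    PySem.Set.contains (PySem.Set.ofList (hashesOf v)) z = true ↔ z ∈ hashesOf v := by
  rw [PySem.Set.contains_iff, PySem.Set.mem_ofList]

-- THE CRUX: for every orientation, A's (y, x) window scan and B's anchor scan build the same set
theorem scan_eq (diffs : List Int) (d0 : Int) (rest : List Int) (hdiffs : diffs = d0 :: rest)
    (sz H W : Int) (hsz : 1 ≤ sz) (hW : W ≤ sz)
    (hpos : ∀ d ∈ diffs, 0 ≤ d) (v : List Char) :
    scanA diffs sz H W v [] = scanB diffs d0 sz H W v := by
  have hd0 : d0 ∈ diffs := by rw [hdiffs]; exact List.mem_cons_self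
  -- A's double loop is a fold over the filtered window-base list
  have h1 : scanA diffs sz H W v [] =
      ((windowBases sz H W).filter (matchA v diffs)).foldl
        (fun acc b => PySem.Set.update acc (diffs.map (fun i => b + i))) [] := by
    rw [windowBases, ← PySem.List.foldl_if_eq_foldl_filter, List.foldl_flatMap]
    simp only [scanA, List.foldl_map]
  -- B's anchor loop is a fold over the shifted filtered '#'-positions
  have h2 : scanB diffs d0 sz H W v =
      (((hashesOf v).filter (okB diffs d0 sz H W v)).map (fun p => p - d0)).foldl
        (fun acc b => PySem.Set.update acc (diffs.map (fun i => b + i))) [] := by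
    simp only [scanB]
    rw [show (PySem.Set.empty : PySem.Set Int) = ([] : List Int) from rfl,
      List.foldl_map, ← PySem.List.foldl_if_eq_foldl_filter]
    refine PySem.List.foldl_congr_mem _ _ _ _ ?_
    intro acc p _
    by_cases hneg : p - d0 < 0
    · simp [okB, hneg]
    · simp [okB, hneg]
  rw [h1, h2]
  congr 1
  -- the two base lists are equal: both strictly increasing with the same members
  have hpwL : ((windowBases sz H W).filter (matchA v diffs)).Pairwise (· < ·) :=
    (pairwise_windowBases sz H W hW).filter _
  have hpwR : ((((hashesOf v).filter (okB diffs d0 sz H W v))).map (fun p => p - d0)).Pairwise (· < ·) :=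
    List.pairwise_map.mpr (((pairwise_hashesOf v).filter _).imp (by omega))
  have hmem : ∀ a, a ∈ ((windowBases sz H W).filter (matchA v diffs)) ↔
      a ∈ (((hashesOf v).filter (okB diffs d0 sz H W v)).map (fun p => p - d0)) := by
    intro a
    have hkey : ∀ b : Int, 0 ≤ b →
        ((matchA v diffs b) = true ↔ ∀ d ∈ diffs, (b + d) ∈ hashesOf v) := by
      intro b hb
      rw [matchA, List.all_eq_true]
      constructor
      · intro h d hdm
        exact (pyGet_hash v (b + d) (by have := hpos d hdm; omega)).mp (h d hdm)
      · intro h d hdm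
        exact (pyGet_hash v (b + d) (by have := hpos d hdm; omega)).mpr (h d hdm)
    simp only [List.mem_filter, List.mem_map, mem_windowBases sz H W a hsz hW, okB,
      Bool.and_eq_true, Bool.not_eq_eq_eq_not, Bool.not_true, decide_eq_false_iff_not,
      decide_eq_true_eq, List.all_eq_true]
    constructor
    · rintro ⟨⟨ha0, hfd, hmd⟩, hm⟩
      refine ⟨a + d0, ⟨(hkey a ha0).mp hm d0 hd0, by omega,
        ⟨by rw [show a + d0 - d0 = a by ring]; exact hfd,
         by rw [show a + d0 - d0 = a by ring]; exact hmd⟩, ?_⟩, by ring⟩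
      intro d hdm
      rw [show a + d0 - d0 = a by ring]
      exact (contains_hashes v (a + d)).mpr ((hkey a ha0).mp hm d hdm)
    · rintro ⟨p, ⟨hp, hge, ⟨hfd, hmd⟩, hall⟩, hpa⟩
      subst hpa
      refine ⟨⟨by omega, hfd, hmd⟩, ?_⟩
      refine (hkey (p - d0) (by omega)).mpr ?_
      intro d hdm
      exact (contains_hashes v (p - d0 + d)).mp (hall d hdm)
  have hndL : ((windowBases sz H W).filter (matchA v diffs)).Nodup :=
    hpwL.imp (fun h => ne_of_lt h)
  have hndR : ((((hashesOf v).filter (okB diffs d0 sz H W v))).map (fun p => p - d0)).Nodup :=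
    hpwR.imp (fun h => ne_of_lt h)
  have hperm : (((hashesOf v).filter (okB diffs d0 sz H W v)).map (fun p => p - d0)).Perm
      ((windowBases sz H W).filter (matchA v diffs)) :=
    (List.perm_ext_iff_of_nodup hndR hndL).mpr (fun a => ((hmem a).symm))
  have e1 : PySem.List.sorted ((windowBases sz H W).filter (matchA v diffs)) (fun x => x) =
      ((windowBases sz H W).filter (matchA v diffs)) :=
    PySem.List.sorted_eq_of_perm_of_pairwise_lt _ _ _ (List.Perm.refl _) hpwL
  have e2 : PySem.List.sorted ((windowBases sz H W).filter (matchA v diffs)) (fun x => x) =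
      (((hashesOf v).filter (okB diffs d0 sz H W v)).map (fun p => p - d0)) :=
    PySem.List.sorted_eq_of_perm_of_pairwise_lt _ _ _ hperm hpwR
  rw [← e1, e2]

-- ===== VERDICT (by name: the statement is the Claim_ definition above) =====
theorem findpat_spec : Claim_equal_findpat := by
  intro tile pattern sz _ hpre
  unfold Spec_findpat
  obtain ⟨hsz, hcase⟩ := hpre
  rcases hd : patDiffs pattern sz with _ | ⟨d0, rest⟩
  · simp only [findpat, findpat_alt, hd]
    rw [show (PySem.Set.empty : PySem.Set Int) = ([] : List Int) from rfl,
      loopA_none [] sz _ _ (fun v found => scanA_empty_diffs ..) (variantsC tile.toList sz)]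
    rfl
  · simp only [findpat, findpat_alt, hd]
    by_cases hHW : sz - (pattern.length : Int) + 1 ≤ 0 ∨
        sz - ((PySem.List.pyGetD pattern 0 "").toList.length : Int) + 1 ≤ 0
    · rw [if_pos hHW,
        show (PySem.Set.empty : PySem.Set Int) = ([] : List Int) from rfl,
        loopA_none _ sz _ _ (fun v found => scanA_no_window _ _ _ _ hHW v found)
          (variantsC tile.toList sz)]
      rfl
    · rw [if_neg hHW]
      rw [not_or] at hHW
      obtain ⟨hHW1, hHW2⟩ := hHW
      have hpne : pattern ≠ [] := by
        intro hnil
        rw [hnil] at hd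
        simp [patDiffs, PySem.List.enumerate] at hd
      have hsharp : ∃ l ∈ pattern, '#' ∈ l.toList :=
        patDiffs_ne_nil pattern sz (by simp [hd])
      have hsafe : 1 ≤ sz ∧
          ∀ l ∈ pattern, l.toList.length ≤ (PySem.List.pyGetD pattern 0 "").toList.length := by
        rcases hcase with h1 | h2 | h3 | h4
        · omega
        · omega
        · obtain ⟨l, hl, hc⟩ := hsharp; exact absurd hc (h3.2 l hl)
        · exact ⟨h4.1, h4.2.2.2⟩
      have hL0 : 1 ≤ ((PySem.List.pyGetD pattern 0 "").toList.length : Int) := by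
        obtain ⟨l, hl, hc⟩ := hsharp
        have h1 : 1 ≤ l.toList.length := List.length_pos_of_mem hc
        have h2 := hsafe.2 l hl
        omega
      rw [show (PySem.Set.empty : PySem.Set Int) = ([] : List Int) from rfl,
        loop_eq (d0 :: rest) d0 sz _ _
          (fun v => scan_eq (d0 :: rest) d0 rest rfl sz _ _ hsafe.1 (by omega)
            (hd ▸ patDiffs_nonneg pattern sz (by omega)) v)
          (variantsC tile.toList sz)]
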